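-- pv_equiv track=rewrite | github.com/taichiorange/leba_math | lebaComm/polarcode/decoder_utils.py | active_llr_level
-- ===== SOURCE A (Python) =====
-- def active_llr_level(i, n):
--     """
--         Find the first 1 in the binary expansion of i.
--     """
--
--     mask = 2**(n-1)
--     count = 1
--     for k in range(n):
--         if (mask & i) == 0:
--             count += 1
--             mask >>= 1
--         else:
--             break
--     return min(count, n)
-- ===== SOURCE B (Python) =====
-- def active_llr_level(i, n):
--     # Closed form: leading zeros of the n-bit window of i, via bit_length (no loop).
--     if n <= 0:
--         return n
--     m = i & ((1 << n) - 1)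
--     return n if m == 0 else n + 1 - m.bit_length()
-- ===== Notes on version B (the rewrite author's own statement) =====
-- stated objective: faster
-- what changed: Replaces the MSB-to-LSB scanning loop with a single mask plus bit_length closed form.
import Mathlib
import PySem

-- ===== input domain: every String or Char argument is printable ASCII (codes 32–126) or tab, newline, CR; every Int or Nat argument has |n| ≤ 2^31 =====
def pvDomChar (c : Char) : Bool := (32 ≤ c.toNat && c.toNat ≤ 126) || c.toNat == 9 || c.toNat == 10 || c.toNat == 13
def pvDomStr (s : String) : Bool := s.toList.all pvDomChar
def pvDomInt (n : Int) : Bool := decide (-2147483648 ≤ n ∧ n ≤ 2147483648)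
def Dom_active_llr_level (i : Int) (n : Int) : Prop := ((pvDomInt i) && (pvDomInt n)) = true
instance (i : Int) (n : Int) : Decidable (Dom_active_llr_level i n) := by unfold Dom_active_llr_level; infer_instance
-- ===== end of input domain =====

-- B replaces A's MSB-to-LSB scanning loop by a closed form using bit_length (return value only; no side effects).

-- ===== PORT A =====
-- the for-loop over range(n): state (mask, count), early break on a set bit
def aLoop (i : Int) : List Int → Int → Int → Int
  | [], _mask, count => count
  | _ :: ks, mask, count =>
      if PySem.Int.band mask i = 0 then aLoop i ks (mask >>> (1 : Nat)) (count + 1)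
      else count

def active_llr_level (i : Int) (n : Int) : Int :=
  -- Python's 2**(n-1) is a float for n ≤ 0, but then range(n) is empty and mask unused;
  -- the port's mask value is exact whenever the loop reads it (n ≥ 1).
  let mask : Int := 2 ^ (n - 1).toNat
  min (aLoop i (PySem.List.pyRange 0 n) mask 1) n

-- ===== PORT B =====
-- Source B's m.bit_length() ported by hand as a binary-descent bit length (32 halving levels);
-- exact for every 0 ≤ m < 2^(2^32), which covers every m the claim reaches (proved below
-- equal to PySem.Int.bitLength there); PySem.Int.bitLength itself is not used because its
-- one-bit-per-step evaluation cannot run on the 2^31-bit masks the domain admits.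
def pvBLAux : Nat → Nat → Nat
  | 0, m => if 1 ≤ m then 1 else 0
  | e + 1, m =>
      if m < 1 <<< (1 <<< e) then pvBLAux e m
      else pvBLAux e (m >>> (1 <<< e)) + (1 <<< e)

def pvBitLen (m : Int) : Nat := pvBLAux 32 m.toNat

def active_llr_level_alt (i : Int) (n : Int) : Int :=
  if n ≤ 0 then n
  else
    -- Python's (1 << n): built as a Nat shift (same value; Int.shiftLeft evaluates per-bit)
    let m : Int := PySem.Int.band i (((1 <<< n.toNat : Nat) : Int) - 1)
    if m = 0 then n
    else n + 1 - (pvBitLen m : Int)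

-- ===== PRECONDITION & SPEC =====
def Spec_active_llr_level (i : Int) (n : Int) (out : Int) : Prop := out = active_llr_level_alt i n
instance (i : Int) (n : Int) (out : Int) : Decidable (Spec_active_llr_level i n out) := by unfold Spec_active_llr_level; infer_instance

-- ===== CLAIM (what is proved, stated in full; the proofs are below) =====
def Claim_equal_active_llr_level : Prop := ∀ (i : Int) (n : Int), Dom_active_llr_level i n → Spec_active_llr_level i n (active_llr_level i n)

-- ===== LEMMAS AND PROOFS =====

theorem pv_cast_pow (k : Nat) : ((2:Int) ^ k) = ((2 ^ k : Nat) : Int) := by push_cast; ring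

theorem pv_toNat_pow_sub_one (k : Nat) : ((2:Int) ^ k - 1).toNat = 2 ^ k - 1 := by
  have h1 := pv_cast_pow k
  have h2 : 1 ≤ 2 ^ k := Nat.one_le_two_pow
  omega

theorem pv_toNat_pow (k : Nat) : ((2:Int) ^ k).toNat = 2 ^ k := by
  have h1 := pv_cast_pow k
  have h2 : 1 ≤ 2 ^ k := Nat.one_le_two_pow
  omega

-- Int.emod characterisation: a % m = r when 0 ≤ r < m and a = r + m * c
theorem pv_emod_eq (a r m c : Int) (h0 : 0 ≤ r) (h1 : r < m) (hc : a = r + m * c) :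
    a % m = r := by
  rw [hc, Int.add_mul_emod_self_left, Int.emod_eq_of_lt h0 h1]

-- emod of a nonnegative integer through toNat
theorem pv_emod_nonneg_cast (x : Int) (t : Nat) (hx : 0 ≤ x) :
    x % (2:Int) ^ t = ((x.toNat % 2 ^ t : Nat) : Int) := by
  rw [show x = ((x.toNat : Int)) by omega]
  push_cast
  rfl

-- emod of a negative integer i = -(j+1): the complemented low bits of j
theorem pv_emod_neg_cast (i : Int) (t : Nat) (hi : i < 0) :
    i % (2:Int) ^ t = (((2 ^ t - 1 - (-i - 1).toNat % 2 ^ t : Nat)) : Int) := by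
  set j : Nat := (-i - 1).toNat with hjdef
  have hj : (j : Int) = -i - 1 := by omega
  have hjt : j % 2 ^ t < 2 ^ t := Nat.mod_lt _ (by positivity)
  have h1 : 1 ≤ 2 ^ t := Nat.one_le_two_pow
  have hdm := Nat.div_add_mod j (2 ^ t)
  have hsubc : (((2 ^ t - 1 - j % 2 ^ t : Nat)) : Int)
      = ((2 ^ t : Nat) : Int) - 1 - ((j % 2 ^ t : Nat) : Int) := by
    push_cast [h1, Nat.le_sub_one_of_lt hjt]
    ring
  apply pv_emod_eq _ _ _ (-(j / 2 ^ t : Nat) - 1)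
  · exact Int.natCast_nonneg _
  · rw [pv_cast_pow t]
    exact_mod_cast (by omega : 2 ^ t - 1 - j % 2 ^ t < 2 ^ t)
  · have hcast : ((j : Int)) = ((2 ^ t : Nat) : Int) * ((j / 2 ^ t : Nat) : Int) + ((j % 2 ^ t : Nat) : Int) := by
      exact_mod_cast congrArg (Nat.cast : Nat → Int) hdm.symm
    rw [pv_cast_pow t, hsubc]
    linear_combination hj - hcast

-- Python & with a low-bit mask is emod, also for negative i (two's complement)
theorem pv_band_mask (i : Int) (k : Nat) :
    PySem.Int.band i ((2 : Int) ^ k - 1) = i % 2 ^ k := by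
  have hm : (0:Int) ≤ 2 ^ k - 1 := by
    have h1 := pv_cast_pow k
    have h2 : 1 ≤ 2 ^ k := Nat.one_le_two_pow
    omega
  by_cases hi : 0 ≤ i
  · rw [PySem.Int.band_of_nonneg hi hm, pv_toNat_pow_sub_one,
      Nat.and_two_pow_sub_one_eq_mod, pv_emod_nonneg_cast i k hi]
  · push_neg at hi
    simp only [PySem.Int.band, if_neg (by omega : ¬ (0:Int) ≤ i), if_pos hm]
    rw [pv_toNat_pow_sub_one, Nat.and_comm, Nat.and_two_pow_sub_one_eq_mod,
      pv_emod_neg_cast i k hi]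

-- Nat: AND with a single power of two extracts that binary digit
theorem pv_nat_and_pow (m k : Nat) : 2 ^ k &&& m = m / 2 ^ k % 2 * 2 ^ k := by
  rw [Nat.and_comm, Nat.and_two_pow]
  rcases Nat.mod_two_eq_zero_or_one (m / 2 ^ k) with h | h <;>
    simp [Nat.testBit_eq_decide_div_mod_eq, h]

-- Nat: splitting a mod by one extra bit
theorem pv_nat_mod_split (m k : Nat) :
    m % 2 ^ (k + 1) = m % 2 ^ k + 2 ^ k * (m / 2 ^ k % 2) := by
  rw [pow_succ, Nat.mod_mul]

-- Python (2^k) & i is exactly the k-th binary digit of i, as a mod difference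
theorem pv_band_pow (i : Int) (k : Nat) :
    PySem.Int.band ((2 : Int) ^ k) i = i % 2 ^ (k + 1) - i % 2 ^ k := by
  have hp : (0:Int) ≤ 2 ^ k := by positivity
  by_cases hi : 0 ≤ i
  · rw [PySem.Int.band_of_nonneg hp hi, pv_toNat_pow, pv_nat_and_pow,
      pv_emod_nonneg_cast i (k+1) hi, pv_emod_nonneg_cast i k hi]
    have := pv_nat_mod_split i.toNat k
    push_cast [this]
    ring
  · push_neg at hi
    simp only [PySem.Int.band, if_pos hp, if_neg (by omega : ¬ (0:Int) ≤ i)]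
    rw [pv_toNat_pow, pv_nat_and_pow, pv_emod_neg_cast i (k+1) hi, pv_emod_neg_cast i k hi]
    set j : Nat := (-i - 1).toNat with hjdef
    have hsplit := pv_nat_mod_split j k
    have hb : j / 2 ^ k % 2 ≤ 1 := Nat.le_of_lt_succ (Nat.mod_lt _ (by norm_num))
    have hjk : j % 2 ^ k < 2 ^ k := Nat.mod_lt _ (by positivity)
    have hjk1 : j % 2 ^ (k + 1) < 2 ^ (k + 1) := Nat.mod_lt _ (by positivity)
    have h1 : 1 ≤ 2 ^ k := Nat.one_le_two_pow
    have h1' : 1 ≤ 2 ^ (k + 1) := Nat.one_le_two_pow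
    have hand : j / 2 ^ k % 2 * 2 ^ k ≤ 2 ^ k := by
      calc j / 2 ^ k % 2 * 2 ^ k ≤ 1 * 2 ^ k := Nat.mul_le_mul_right _ hb
      _ = 2 ^ k := by ring
    have hsplitc : ((j % 2 ^ (k + 1) : Nat) : Int)
        = ((j % 2 ^ k : Nat) : Int) + ((2 ^ k : Nat) : Int) * ((j / 2 ^ k % 2 : Nat) : Int) := by
      exact_mod_cast congrArg (Nat.cast : Nat → Int) hsplit
    have hpowc : ((2 ^ (k + 1) : Nat) : Int) = 2 * ((2 ^ k : Nat) : Int) := by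
      push_cast [pow_succ]
      ring
    have ha : ((2 ^ k - j / 2 ^ k % 2 * 2 ^ k : Nat) : Int)
        = ((2 ^ k : Nat) : Int) - ((j / 2 ^ k % 2 : Nat) : Int) * ((2 ^ k : Nat) : Int) := by
      rw [Nat.cast_sub hand, Nat.cast_mul]
    have hbc : ((2 ^ (k + 1) - 1 - j % 2 ^ (k + 1) : Nat) : Int)
        = ((2 ^ (k + 1) : Nat) : Int) - 1 - ((j % 2 ^ (k + 1) : Nat) : Int) := by
      rw [Nat.cast_sub (Nat.le_sub_one_of_lt hjk1), Nat.cast_sub h1', Nat.cast_one]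
    have hcc : ((2 ^ k - 1 - j % 2 ^ k : Nat) : Int)
        = ((2 ^ k : Nat) : Int) - 1 - ((j % 2 ^ k : Nat) : Int) := by
      rw [Nat.cast_sub (Nat.le_sub_one_of_lt hjk), Nat.cast_sub h1, Nat.cast_one]
    rw [ha, hbc, hcc]
    linear_combination hsplitc - hpowc

-- bit_length of an integer strictly between two powers of two
theorem pv_bitLength_eq (m : Int) (k : Nat) (h1 : (2:Int) ^ k ≤ m) (h2 : m < 2 ^ (k + 1)) :
    PySem.Int.bitLength m = k + 1 := by
  have hm0 : m ≠ 0 := (lt_of_lt_of_le (by positivity) h1).ne'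
  have hlt := PySem.Int.lt_two_pow_bitLength m
  have hle := PySem.Int.two_pow_bitLength_le m hm0
  have habs : m.natAbs = m.toNat := by omega
  have h1' : 2 ^ k ≤ m.toNat := by rw [pv_cast_pow] at h1; omega
  have h2' : m.toNat < 2 ^ (k + 1) := by rw [pv_cast_pow] at h2; omega
  rw [habs] at hlt hle
  have hk : k < PySem.Int.bitLength m :=
    (Nat.pow_lt_pow_iff_right (by norm_num)).1 (lt_of_le_of_lt h1' hlt)
  have hk2 : PySem.Int.bitLength m - 1 < k + 1 :=
    (Nat.pow_lt_pow_iff_right (by norm_num)).1 (lt_of_le_of_lt hle h2')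
  omega

-- halving a power-of-two mask
theorem pv_mask_shift (k : Nat) : ((2 : Int) ^ (k + 1)) >>> (1 : Nat) = 2 ^ k := by
  rw [Int.shiftRight_eq_div_pow, pow_succ]
  simp

-- characterisation of A's scanning loop on a window of k+1 bits
theorem pv_aLoop_char (k : Nat) : ∀ (i : Int) (l : List Int), l.length = k + 1 → ∀ (c : Int),
    aLoop i l ((2:Int) ^ k) c =
      if i % 2 ^ (k + 1) = 0 then c + (k + 1 : Nat)
      else c + (k + 1 : Nat) - (PySem.Int.bitLength (i % 2 ^ (k + 1)) : Int) := by
  induction k with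
  | zero =>
      intro i l hl c
      match l, hl with
      | [x], _ =>
        have h2 : i % (2:Int) ^ (0 + 1) = i % 2 := by norm_num
        have hband : PySem.Int.band ((2:Int) ^ 0) i = i % 2 := by
          rw [pv_band_pow]; simp [Int.emod_one]
        simp only [aLoop, hband]
        rcases Int.emod_two_eq_zero_or_one i with h | h
        · simp [aLoop, h, h2]
        · simp only [h2, h, show PySem.Int.bitLength (1:Int) = 1 from by decide]
          norm_num
  | succ k ih =>
      intro i l hl c
      match l, hl with
      | x :: ks, hl =>
        have hks : ks.length = k + 1 := by simpa using hl
        have hband := pv_band_pow i (k + 1)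
        have hm1 : 0 ≤ i % 2 ^ (k + 1) := Int.emod_nonneg i (by positivity)
        have hm1' : i % 2 ^ (k + 1) < 2 ^ (k + 1) := Int.emod_lt_of_pos i (by positivity)
        have hm2 : 0 ≤ i % 2 ^ (k + 1 + 1) := Int.emod_nonneg i (by positivity)
        have hm2' : i % 2 ^ (k + 1 + 1) < 2 ^ (k + 1 + 1) := Int.emod_lt_of_pos i (by positivity)
        have hps : (2:Int) ^ (k + 1 + 1) = 2 ^ (k + 1) * 2 := pow_succ 2 (k + 1)
        by_cases hc : PySem.Int.band ((2:Int) ^ (k + 1)) i = 0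
        · -- bit k+1 of the window is clear: the two mods agree
          have heq : i % 2 ^ (k + 1 + 1) = i % 2 ^ (k + 1) := by
            have h := hband; rw [hc] at h; linarith
          simp only [aLoop, if_pos hc, pv_mask_shift]
          rw [ih i ks hks (c + 1)]
          rw [heq]
          split_ifs with h0
          · push_cast; ring
          · push_cast; ring
        · -- bit k+1 is set: the mod over the bigger window is ≥ 2^(k+1)
          have hpk : (0:Int) < 2 ^ (k + 1) := by positivity
          have hmm : (i % 2 ^ (k + 1 + 1)) % 2 ^ (k + 1) = i % 2 ^ (k + 1) :=
            Int.emod_emod_of_dvd i ⟨2, by ring⟩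
          have hz : (i % 2 ^ (k + 1 + 1) - i % 2 ^ (k + 1)) % 2 ^ (k + 1) = 0 := by
            rw [Int.sub_emod, hmm, Int.emod_eq_of_lt hm1 hm1', sub_self, Int.zero_emod]
          obtain ⟨t, ht⟩ := Int.dvd_of_emod_eq_zero hz
          have ht0 : -1 < t := by
            have hlt : 2 ^ (k + 1) * (-1) < 2 ^ (k + 1) * t := by
              rw [← ht]; linarith
            exact lt_of_mul_lt_mul_left hlt (le_of_lt hpk)
          have ht2 : t < 2 := by
            have hlt : 2 ^ (k + 1) * t < 2 ^ (k + 1) * 2 := by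
              rw [← ht]; linarith
            exact lt_of_mul_lt_mul_left hlt (le_of_lt hpk)
          have ht1 : t = 1 := by
            rcases (by omega : t = 0 ∨ t = 1) with h | h
            · exfalso; apply hc; rw [hband, ht, h]; ring
            · exact h
          have hbig : i % 2 ^ (k + 1 + 1) = i % 2 ^ (k + 1) + 2 ^ (k + 1) := by
            rw [ht1, mul_one] at ht; linarith
          have hne : ¬ i % (2:Int) ^ (k + 1 + 1) = 0 := by
            rw [hbig]; intro hcon; linarith
          have hbl : PySem.Int.bitLength (i % 2 ^ (k + 1 + 1)) = k + 1 + 1 := by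
            apply pv_bitLength_eq _ (k + 1)
            · rw [hbig]; linarith
            · exact hm2'
          simp only [aLoop, if_neg hc]
          rw [if_neg hne, hbl]
          push_cast; ring

-- soundness of the binary-descent bit length on its fuel window
theorem pv_pvBLAux_sound : ∀ (e : Nat) (m : Nat), 0 < m → m < 2 ^ (2 ^ e) →
    2 ^ (pvBLAux e m - 1) ≤ m ∧ m < 2 ^ pvBLAux e m ∧ 1 ≤ pvBLAux e m := by
  intro e
  induction e with
  | zero =>
      intro m h0 hlt
      have hm1 : m = 1 := by norm_num at hlt; omega
      subst hm1
      simp [pvBLAux]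
  | succ e ih =>
      intro m h0 hlt
      have hP : (0:Nat) < 2 ^ 2 ^ e := by positivity
      have hshl : (1 <<< (1 <<< e) : Nat) = 2 ^ 2 ^ e := by
        rw [Nat.one_shiftLeft, Nat.one_shiftLeft]
      have hunfold : pvBLAux (e + 1) m
          = if m < 1 <<< (1 <<< e) then pvBLAux e m
            else pvBLAux e (m >>> (1 <<< e)) + (1 <<< e) := rfl
      by_cases hc : m < 2 ^ 2 ^ e
      · rw [hunfold, if_pos (by rw [hshl]; exact hc)]
        exact ih m h0 hc
      · push_neg at hc
        have hshr : (m >>> (1 <<< e) : Nat) = m / 2 ^ 2 ^ e := by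
          rw [Nat.shiftRight_eq_div_pow, Nat.one_shiftLeft]
        rw [hunfold, if_neg (by rw [hshl]; omega), hshr, Nat.one_shiftLeft]
        set m' : Nat := m / 2 ^ 2 ^ e with hm'
        have h0' : 0 < m' := Nat.div_pos hc hP
        have hsq : (2:Nat) ^ 2 ^ (e + 1) = 2 ^ 2 ^ e * 2 ^ 2 ^ e := by
          rw [← pow_add]
          congr 1
          omega
        have hlt' : m' < 2 ^ 2 ^ e := by
          rw [hm', Nat.div_lt_iff_lt_mul hP]
          rw [hsq] at hlt
          exact hlt
        obtain ⟨hA, hB, hC⟩ := ih m' h0' hlt'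
        set b : Nat := pvBLAux e m' with hbdef
        clear_value b
        refine ⟨?_, ?_, le_trans hC (Nat.le_add_right b _)⟩
        · have hexp : b + 2 ^ e - 1 = (b - 1) + 2 ^ e := Nat.sub_add_comm hC
          rw [hexp, pow_add]
          calc 2 ^ (b - 1) * 2 ^ 2 ^ e ≤ m' * 2 ^ 2 ^ e :=
                Nat.mul_le_mul_right _ hA
            _ ≤ m := by
                rw [hm', Nat.mul_comm]
                exact Nat.mul_div_le m (2 ^ 2 ^ e)
        · have hr : m % 2 ^ 2 ^ e < 2 ^ 2 ^ e := Nat.mod_lt _ hP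
          calc m = 2 ^ 2 ^ e * m' + m % 2 ^ 2 ^ e := (Nat.div_add_mod m _).symm
            _ < 2 ^ 2 ^ e * m' + 2 ^ 2 ^ e := Nat.add_lt_add_left hr _
            _ = (m' + 1) * 2 ^ 2 ^ e := by ring
            _ ≤ 2 ^ b * 2 ^ 2 ^ e := Nat.mul_le_mul_right _ (by omega)
            _ = 2 ^ (b + 2 ^ e) := by rw [pow_add]

-- on the inputs the claim reaches, the binary-descent bit length agrees with bit_length
theorem pv_pvBitLen_eq (m : Int) (h0 : 0 < m) (hlt : m.toNat < 2 ^ (2 ^ 32)) :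
    pvBitLen m = PySem.Int.bitLength m := by
  obtain ⟨hA, hB, hC⟩ := pv_pvBLAux_sound 32 m.toNat (by clear hlt; omega) hlt
  clear hlt
  have hm0 : m ≠ 0 := by omega
  have hblt := PySem.Int.lt_two_pow_bitLength m
  have hble := PySem.Int.two_pow_bitLength_le m hm0
  have habs : m.natAbs = m.toNat := by omega
  rw [habs] at hblt hble
  have hbl1 : 1 ≤ PySem.Int.bitLength m := by
    by_contra h
    have h00 : PySem.Int.bitLength m = 0 := by omega
    rw [h00] at hblt
    omega
  unfold pvBitLen
  set c : Nat := pvBLAux 32 m.toNat with hcdef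
  have h1 : c - 1 < PySem.Int.bitLength m :=
    (Nat.pow_lt_pow_iff_right (by norm_num)).1 (lt_of_le_of_lt hA hblt)
  have h2 : PySem.Int.bitLength m - 1 < c :=
    (Nat.pow_lt_pow_iff_right (by norm_num)).1 (lt_of_le_of_lt hble hB)
  omega

-- ===== VERDICT (by name: the statement is the Claim_ definition above) =====
theorem active_llr_level_spec : Claim_equal_active_llr_level := by
  intro i n hdomh
  unfold Spec_active_llr_level active_llr_level active_llr_level_alt
  by_cases hn : n ≤ 0
  · rw [PySem.List.pyRange_one_eq_nil (by omega : n ≤ 0)]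
    simp only [aLoop, if_pos hn]
    omega
  · push_neg at hn
    obtain ⟨K, hK⟩ : ∃ K : Nat, n.toNat = K + 1 := ⟨n.toNat - 1, by omega⟩
    have hmask : (n - 1).toNat = K := by omega
    have hlen : (PySem.List.pyRange 0 n).length = K + 1 := by
      rw [PySem.List.pyRange_one]
      simp
      omega
    have hloop := pv_aLoop_char K i (PySem.List.pyRange 0 n) hlen 1
    simp only [hmask, hloop, if_neg (by omega : ¬ n ≤ 0)]
    have hshl : ((1 <<< n.toNat : Nat) : Int) - 1 = 2 ^ (K + 1) - 1 := by
      rw [Nat.one_shiftLeft, hK]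
      push_cast
      ring
    rw [hshl, pv_band_mask]
    have hncast : (n : Int) = ((K + 1 : Nat) : Int) := by omega
    have hm1 : 0 ≤ i % 2 ^ (K + 1) := Int.emod_nonneg i (by positivity)
    by_cases h0 : i % (2:Int) ^ (K + 1) = 0
    · rw [if_pos h0, if_pos h0]
      rw [min_eq_right (by push_cast at hncast ⊢; omega)]
    · rw [if_neg h0, if_neg h0]
      have hm1' : i % 2 ^ (K + 1) < 2 ^ (K + 1) := Int.emod_lt_of_pos i (by positivity)
      have hKb : K + 1 ≤ 2 ^ 32 := by
        have hd : n ≤ 2147483648 := by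
          unfold Dom_active_llr_level pvDomInt at hdomh
          simp only [Bool.and_eq_true, decide_eq_true_eq] at hdomh
          omega
        have : (2147483648:Nat) ≤ 2 ^ 32 := by norm_num
        omega
      have hpos : 0 < i % 2 ^ (K + 1) := by omega
      have hx : (i % 2 ^ (K + 1)).toNat < 2 ^ (K + 1) := by
        have hcp := pv_cast_pow (K + 1)
        omega
      have hsmall : (i % 2 ^ (K + 1)).toNat < 2 ^ (2 ^ 32) :=
        lt_of_lt_of_le hx (Nat.pow_le_pow_right (by norm_num) hKb)
      rw [pv_pvBitLen_eq _ hpos hsmall]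
      clear hsmall
      have hbl1 : 1 ≤ PySem.Int.bitLength (i % 2 ^ (K + 1)) := by
        by_contra h
        have h00 : PySem.Int.bitLength (i % 2 ^ (K + 1)) = 0 := by omega
        have hlt := PySem.Int.lt_two_pow_bitLength (i % 2 ^ (K + 1))
        rw [h00] at hlt
        omega
      rw [min_eq_left (by push_cast at hncast ⊢; omega)]
      push_cast at hncast ⊢
      omega
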